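-- pv_equiv track=rewrite | github.com/MarcoPolo483/eva-api | deploy-package/eva_api/services/webhook_service.py | _matches_wildcard
-- ===== SOURCE A (Python) =====
-- from typing import Any, Dict, List, Optional
--
-- def _matches_wildcard(event_type: str, subscribed_events: List[str]) -> bool:
--     """Check if event type matches any wildcard subscriptions.
--
--     Args:
--         event_type: Event type (e.g., "document.added")
--         subscribed_events: List of subscribed event patterns (e.g., ["document.*"])
--
--     Returns:
--         True if event matches any subscription
--     """
--     for pattern in subscribed_events:
--         if pattern.endswith(".*"):
--             prefix = pattern[:-2]  # Remove ".*"
--             if event_type.startswith(prefix + "."):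
--                 return True
--         elif pattern == "*":
--             return True
--
--     return False
-- ===== SOURCE B (Python) =====
-- from typing import List
--
--
-- def _matches_wildcard(event_type: str, subscribed_events: List[str]) -> bool:
--     # Index the subscriptions once: the '*' flag and the set of '.*' prefixes.
--     star = False
--     prefixes = set()
--     for pattern in subscribed_events:
--         if pattern == "*":
--             star = True
--         elif pattern.endswith(".*"):
--             prefixes.add(pattern[:-2])
--     if star:
--         return True
--     # Candidate prefixes of the event type that end at a dot boundary.
--     candidates = {event_type[:i] for i, ch in enumerate(event_type) if ch == "."}
--     return not candidates.isdisjoint(prefixes)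
-- ===== Notes on version B (the rewrite author's own statement) =====
-- stated objective: alternative
-- what changed: B replaces A's per-pattern scan with startswith tests by building an index once (a '*' flag plus the set of '.*' prefixes) and intersecting it with the set of the event type's dot-boundary prefixes.
import Mathlib
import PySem

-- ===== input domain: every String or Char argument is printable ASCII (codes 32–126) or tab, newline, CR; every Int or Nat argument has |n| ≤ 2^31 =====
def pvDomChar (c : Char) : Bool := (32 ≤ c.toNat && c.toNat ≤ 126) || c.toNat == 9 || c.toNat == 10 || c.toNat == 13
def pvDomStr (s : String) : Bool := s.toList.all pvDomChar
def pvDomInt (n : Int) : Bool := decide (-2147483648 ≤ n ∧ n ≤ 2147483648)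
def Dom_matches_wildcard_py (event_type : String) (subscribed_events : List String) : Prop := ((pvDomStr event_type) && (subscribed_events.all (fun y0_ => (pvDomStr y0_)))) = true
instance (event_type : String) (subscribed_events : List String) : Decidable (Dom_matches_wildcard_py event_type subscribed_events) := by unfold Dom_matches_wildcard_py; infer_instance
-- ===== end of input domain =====

-- B replaces A's per-pattern startswith scan by an index built once (the set of '.*' prefixes
-- plus a '*' flag) intersected with the event's dot-boundary prefixes (objective: alternative).

-- ===== PORT A =====
-- the for-loop of A: early return True, falls through to False
def pvLoopA (ev : List Char) : List (List Char) → Bool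
  | [] => false
  | p :: rest =>
    if PySem.Chars.endswith p ['.', '*'] then
      -- prefix = pattern[:-2]
      let pre := PySem.List.slice p none (some (-2))
      if PySem.Chars.startswith ev (pre ++ ['.']) then true else pvLoopA ev rest
    else if p = ['*'] then true
    else pvLoopA ev rest

def matches_wildcard_py (event_type : String) (subscribed_events : List String) : Bool :=
  pvLoopA event_type.toList (subscribed_events.map String.toList)

-- ===== PORT B =====
-- B's first loop: fold building (star flag, set of '.*' prefixes)
def pvStepB (acc : Bool × PySem.Set (List Char)) (p : List Char) : Bool × PySem.Set (List Char) :=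
  if p = ['*'] then (true, acc.2)
  else if PySem.Chars.endswith p ['.', '*'] then
    (acc.1, PySem.Set.add acc.2 (PySem.List.slice p none (some (-2))))
  else acc

def matches_wildcard_py_alt (event_type : String) (subscribed_events : List String) : Bool :=
  let ev := event_type.toList
  let idx := (subscribed_events.map String.toList).foldl pvStepB (false, PySem.Set.empty)
  if idx.1 then true
  else
    -- {event_type[:i] for i, ch in enumerate(event_type) if ch == "."}
    let candidates : PySem.Set (List Char) := PySem.Set.ofList
      ((PySem.List.enumerate ev).filterMap
        (fun ic => if ic.2 = '.' then some (PySem.List.slice ev none (some ic.1)) else none))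
    !(PySem.Set.isdisjoint candidates idx.2)

-- ===== PRECONDITION & SPEC =====
def Spec_matches_wildcard_py (event_type : String) (subscribed_events : List String) (out : Bool) : Prop := out = matches_wildcard_py_alt event_type subscribed_events
instance (event_type : String) (subscribed_events : List String) (out : Bool) : Decidable (Spec_matches_wildcard_py event_type subscribed_events out) := by unfold Spec_matches_wildcard_py; infer_instance

-- ===== CLAIM (what is proved, stated in full; the proofs are below) =====
def Claim_equal_matches_wildcard_py : Prop := ∀ (event_type : String) (subscribed_events : List String), Dom_matches_wildcard_py event_type subscribed_events → Spec_matches_wildcard_py event_type subscribed_events (matches_wildcard_py event_type subscribed_events)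

-- ===== LEMMAS AND PROOFS =====

-- the per-pattern condition both programs decide
def pvMatchOne (ev p : List Char) : Prop :=
  (PySem.Chars.endswith p ['.', '*'] = true ∧
    PySem.Chars.startswith ev (PySem.List.slice p none (some (-2)) ++ ['.']) = true) ∨
  (PySem.Chars.endswith p ['.', '*'] = false ∧ p = ['*'])

-- A's loop returns true iff some pattern matches
theorem pvLoopA_iff (ev : List Char) (ps : List (List Char)) :
    pvLoopA ev ps = true ↔ ∃ p ∈ ps, pvMatchOne ev p := by
  induction ps with
  | nil => simp [pvLoopA]
  | cons p rest ih =>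
    simp only [pvLoopA]
    split_ifs with h1 h2 h3
    · simp only [true_iff]
      exact ⟨p, List.mem_cons_self, Or.inl ⟨h1, h2⟩⟩
    · rw [ih]
      constructor
      · rintro ⟨q, hq, hm⟩; exact ⟨q, List.mem_cons_of_mem p hq, hm⟩
      · rintro ⟨q, hq, hm⟩
        rcases List.mem_cons.mp hq with hq | hq
        · subst hq; rcases hm with ⟨_, hs⟩ | ⟨he, _⟩
          · exact absurd hs h2
          · exact absurd h1 (by simp [he])
        · exact ⟨q, hq, hm⟩
    · simp only [true_iff]
      exact ⟨p, List.mem_cons_self, by subst h3; exact Or.inr ⟨by decide, rfl⟩⟩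
    · rw [ih]
      constructor
      · rintro ⟨q, hq, hm⟩; exact ⟨q, List.mem_cons_of_mem p hq, hm⟩
      · rintro ⟨q, hq, hm⟩
        rcases List.mem_cons.mp hq with hq | hq
        · subst hq; rcases hm with ⟨he, _⟩ | ⟨_, hs⟩
          · exact absurd he (by simp [h1])
          · exact absurd hs h3
        · exact ⟨q, hq, hm⟩

-- the fold's star flag
theorem pvFoldB_fst (ps : List (List Char)) (b : Bool) (S : PySem.Set (List Char)) :
    (ps.foldl pvStepB (b, S)).1 = (b || ps.any (fun p => decide (p = ['*']))) := by
  induction ps generalizing b S with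
  | nil => simp
  | cons p rest ih =>
    simp only [List.foldl_cons, List.any_cons, pvStepB]
    split_ifs with h1 h2
    · rw [ih]; simp [h1]
    · rw [ih]; simp [h1]
    · rw [ih]; simp [h1]

-- membership in the fold's prefix set
theorem pvFoldB_snd_mem (ps : List (List Char)) (b : Bool) (S : PySem.Set (List Char)) (x : List Char) :
    x ∈ (ps.foldl pvStepB (b, S)).2 ↔
      x ∈ S ∨ ∃ p ∈ ps, ¬ p = ['*'] ∧ PySem.Chars.endswith p ['.', '*'] = true ∧
        PySem.List.slice p none (some (-2)) = x := by
  induction ps generalizing b S with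
  | nil => simp
  | cons p rest ih =>
    simp only [List.foldl_cons, pvStepB]
    split_ifs with h1 h2
    · rw [ih]; simp only [List.mem_cons]
      constructor
      · rintro (hS | ⟨q, hq, hm⟩)
        · exact Or.inl hS
        · exact Or.inr ⟨q, Or.inr hq, hm⟩
      · rintro (hS | ⟨q, hq | hq, hm⟩)
        · exact Or.inl hS
        · exact absurd h1 (by subst hq; simp [hm.1])
        · exact Or.inr ⟨q, hq, hm⟩
    · rw [ih, PySem.Set.mem_add]; simp only [List.mem_cons]
      constructor
      · rintro ((hS | hx) | hr)
        · exact Or.inl hS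
        · exact Or.inr ⟨p, Or.inl rfl, h1, h2, hx.symm⟩
        · rcases hr with ⟨q, hq, hm⟩; exact Or.inr ⟨q, Or.inr hq, hm⟩
      · rintro (hS | ⟨q, hq | hq, hm⟩)
        · exact Or.inl (Or.inl hS)
        · subst hq; exact Or.inl (Or.inr hm.2.2.symm)
        · exact Or.inr ⟨q, hq, hm⟩
    · rw [ih]; simp only [List.mem_cons]
      constructor
      · rintro (hS | ⟨q, hq, hm⟩)
        · exact Or.inl hS
        · exact Or.inr ⟨q, Or.inr hq, hm⟩
      · rintro (hS | ⟨q, hq | hq, hm⟩)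
        · exact Or.inl hS
        · exact absurd hm.2.1 (by subst hq; simp [h2])
        · exact Or.inr ⟨q, hq, hm⟩

-- the dot-boundary characterisation: ev starts with pre+'.' iff pre is a prefix of ev cut at a dot
theorem pvStartswith_dot_iff (ev pre : List Char) :
    PySem.Chars.startswith ev (pre ++ ['.']) = true ↔
      ∃ k, ∃ h : k < ev.length, ev[k] = '.' ∧ ev.take k = pre := by
  rw [PySem.Chars.startswith_iff]
  constructor
  · rintro ⟨t, ht⟩
    refine ⟨pre.length, ?_, ?_, ?_⟩
    · subst ht; simp
    · subst ht
      simp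
    · subst ht
      rw [List.append_assoc, List.take_left' rfl]

  · rintro ⟨k, hk, hdot, htake⟩
    have hlen : pre.length = k := by
      have := congrArg List.length htake
      simp at this; omega
    refine ⟨ev.drop (k + 1), ?_⟩
    have hdrop : ev.drop k = '.' :: ev.drop (k + 1) := by
      rw [List.drop_eq_getElem_cons hk, hdot]
    calc pre ++ ['.'] ++ ev.drop (k + 1) = pre ++ ('.' :: ev.drop (k + 1)) := by simp
      _ = ev.take k ++ ev.drop k := by rw [← htake, hdrop]
      _ = ev := List.take_append_drop k ev

-- membership in B's candidate list
theorem pvCandidate_mem (ev x : List Char) :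
    (x ∈ ((PySem.List.enumerate ev).filterMap
        (fun ic => if ic.2 = '.' then some (PySem.List.slice ev none (some ic.1)) else none))) ↔
      ∃ k, ∃ h : k < ev.length, ev[k] = '.' ∧ ev.take k = x := by
  simp only [List.mem_filterMap, PySem.List.mem_enumerate_iff]
  constructor
  · rintro ⟨⟨i, c⟩, ⟨k, hk, hpc⟩, hf⟩
    obtain ⟨hi, hc⟩ := Prod.mk.inj hpc
    subst hi; subst hc
    split_ifs at hf with hdot
    · refine ⟨k, hk, hdot, ?_⟩
      have hz : ((0 : Int) + (k : Nat)) = ((k : Nat) : Int) := by omega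
      rw [hz, PySem.List.slice_to_natCast] at hf
      exact Option.some.inj hf
  · rintro ⟨k, hk, hdot, htake⟩
    refine ⟨((k : Int), ev[k]), ⟨k, hk, by simp⟩, ?_⟩
    rw [if_pos hdot]
    have : PySem.List.slice ev none (some ((k : Nat) : Int)) = ev.take k :=
      PySem.List.slice_to_natCast ev k
    rw [this, htake]

-- the main equivalence on the char-list level
theorem pvMain (ev : List Char) (ps : List (List Char)) :
    pvLoopA ev ps =
      (if (ps.foldl pvStepB (false, PySem.Set.empty)).1 then true
       else !(PySem.Set.isdisjoint
          (PySem.Set.ofList ((PySem.List.enumerate ev).filterMap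
            (fun ic => if ic.2 = '.' then some (PySem.List.slice ev none (some ic.1)) else none)))
          (ps.foldl pvStepB (false, PySem.Set.empty)).2)) := by
  have hA := pvLoopA_iff ev ps
  by_cases hstar : (ps.foldl pvStepB (false, PySem.Set.empty)).1 = true
  · rw [if_pos hstar]
    rw [pvFoldB_fst] at hstar
    simp only [Bool.false_or, List.any_eq_true, decide_eq_true_eq] at hstar
    obtain ⟨p, hp, rfl⟩ := hstar
    exact hA.mpr ⟨['*'], hp, Or.inr ⟨by decide, rfl⟩⟩
  · rw [if_neg hstar]
    have hnostar : ∀ p ∈ ps, ¬ p = ['*'] := by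
      intro p hp hpe
      exact hstar (by
        rw [pvFoldB_fst]
        simp only [Bool.false_or, List.any_eq_true, decide_eq_true_eq]
        exact ⟨p, hp, hpe⟩)
    rw [Bool.eq_iff_iff, hA]
    simp only [PySem.Set.isdisjoint, Bool.not_not, List.any_eq_true]
    constructor
    · rintro ⟨p, hp, hm⟩
      rcases hm with ⟨he, hs⟩ | ⟨_, hpe⟩
      · obtain ⟨k, hk, hdot, htake⟩ := (pvStartswith_dot_iff ev _).mp hs
        refine ⟨ev.take k, ?_, ?_⟩
        · exact (PySem.Set.mem_ofList _ _).mpr ((pvCandidate_mem ev _).mpr ⟨k, hk, hdot, rfl⟩)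
        · exact (PySem.Set.contains_iff _ _).mpr
            ((pvFoldB_snd_mem ps false PySem.Set.empty _).mpr
              (Or.inr ⟨p, hp, hnostar p hp, he, htake.symm⟩))
      · exact absurd hpe (hnostar p hp)
    · rintro ⟨c, hc, hcS⟩
      have hc' := (pvCandidate_mem ev c).mp ((PySem.Set.mem_ofList _ _).mp hc)
      have hS := (pvFoldB_snd_mem ps false PySem.Set.empty c).mp ((PySem.Set.contains_iff _ _).mp hcS)
      rcases hS with hS | ⟨p, hp, _, he, hslice⟩
      · exact absurd hS (by simp [PySem.Set.empty])
      · obtain ⟨k, hk, hdot, htake⟩ := hc'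
        refine ⟨p, hp, Or.inl ⟨he, ?_⟩⟩
        exact (pvStartswith_dot_iff ev _).mpr ⟨k, hk, hdot, by rw [hslice, htake]⟩

-- ===== VERDICT (by name: the statement is the Claim_ definition above) =====
theorem matches_wildcard_py_spec : Claim_equal_matches_wildcard_py := by
  intro ev subs _
  unfold Spec_matches_wildcard_py matches_wildcard_py matches_wildcard_py_alt
  exact pvMain ev.toList (subs.map String.toList)
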